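-- pv_equiv track=rewrite | github.com/berylgithub/pes | PES_data_processor.py | many_queries_many_vars_indices
-- ===== SOURCE A (Python) =====
-- def many_queries_many_vars_indices(dicts, list_data):
--     #queries many values and many keys at once!!, e.g.: [{"mol" = "OH", "state" = "$X^2\Pi$"}, {"mol" = "OH", "state" = "$X^2\Sigma$"}, etc]
--     q_idxes = []
--     for i, data in enumerate(list_data):
--         for j, dicti in enumerate(dicts):
--             hit = 0
--             for k, key in enumerate(dicti):
--                 value = dicti[key]
--                 try:
--                     if data[key] == value:
--                         hit += 1 #if a key hits, increment
--                 except KeyError: #if no key found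
--                     continue
--             if hit == len(dicti):
--                 q_idxes.append(i)
--     return q_idxes
-- ===== SOURCE B (Python) =====
-- def many_queries_many_vars_indices(dicts, list_data):
--     # inverted index (key, value) -> ascending list of row indices carrying that pair;
--     # per query intersect the index lists, then count matches per row and emit rows in order
--     index = {}
--     n = len(list_data)
--     for i, data in enumerate(list_data):
--         for kv in data.items():
--             index.setdefault(kv, []).append(i)
--     counts = {}
--     for dicti in dicts:
--         items = list(dicti.items())
--         if not items:
--             matched = list(range(n))
--         else:
--             matched = index.get(items[0], [])
--             for kv in items[1:]:
--                 s = set(index.get(kv, []))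
--                 matched = [i for i in matched if i in s]
--         for i in matched:
--             counts[i] = counts.get(i, 0) + 1
--     return [i for i in range(n) for _ in range(counts.get(i, 0))]
-- ===== Notes on version B (the rewrite author's own statement) =====
-- stated objective: faster
-- what changed: Replaced A's row-by-row scan that re-tests every query dict against every data row (D*Q*K key probes) by an inverted index (key,value)->row-index lists built in one pass, per-query intersection of those lists, and per-row match counts emitted in row order.
import Mathlib
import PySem

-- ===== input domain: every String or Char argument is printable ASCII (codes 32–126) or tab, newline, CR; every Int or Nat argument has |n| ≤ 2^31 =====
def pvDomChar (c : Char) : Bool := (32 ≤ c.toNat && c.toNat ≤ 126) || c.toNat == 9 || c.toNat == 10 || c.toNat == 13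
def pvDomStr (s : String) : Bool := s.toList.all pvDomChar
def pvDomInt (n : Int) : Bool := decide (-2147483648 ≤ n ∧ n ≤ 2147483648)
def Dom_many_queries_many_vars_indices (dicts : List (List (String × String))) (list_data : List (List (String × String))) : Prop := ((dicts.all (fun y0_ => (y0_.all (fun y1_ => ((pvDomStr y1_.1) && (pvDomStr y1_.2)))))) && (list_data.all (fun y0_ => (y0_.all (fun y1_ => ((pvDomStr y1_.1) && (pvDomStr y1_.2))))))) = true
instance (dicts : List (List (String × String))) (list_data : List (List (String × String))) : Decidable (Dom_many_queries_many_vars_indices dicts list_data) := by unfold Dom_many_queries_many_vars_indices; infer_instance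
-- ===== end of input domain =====

-- B replaces A's row×query×key triple scan by an inverted index (key,value) → row indices,
-- intersected per query, with per-row match counts emitted in row order (objective: faster).

-- ===== PORT A =====
-- (iterating a dict's keys and reading dicti[key] is exactly iterating its items, since Dict keys are unique)
def many_queries_many_vars_indices (dicts : List (List (String × String))) (list_data : List (List (String × String))) : List Int :=
  (PySem.List.enumerate list_data 0).foldl (fun q_idxes p =>
    (PySem.List.enumerate dicts 0).foldl (fun q_idxes q =>
      let d := PySem.Dict.ofList q.2
      let hit : Int := (PySem.List.enumerate d.items 0).foldl (fun hit kv =>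
        match (PySem.Dict.ofList p.2).get? kv.2.1 with
        | some v => if v == kv.2.2 then hit + 1 else hit
        | none => hit) 0
      if hit == (PySem.Dict.size d : Int) then q_idxes ++ [p.1] else q_idxes) q_idxes) []

-- ===== PORT B =====
-- index.setdefault(kv, []).append(i) over all rows' items
def mqIndex (list_data : List (List (String × String))) : PySem.Dict (String × String) (List Int) :=
  (PySem.List.enumerate list_data 0).foldl (fun ix p =>
    (PySem.Dict.ofList p.2).items.foldl (fun ix kv => ix.modify kv [] (· ++ [p.1])) ix) PySem.Dict.empty

-- intersection of the index lists of a query's items (all rows for an empty query)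
def mqMatched (ix : PySem.Dict (String × String) (List Int)) (n : Int) (dicti : List (String × String)) : List Int :=
  match (PySem.Dict.ofList dicti).items with
  | [] => PySem.List.pyRange 0 n 1
  | kv0 :: rest => rest.foldl (fun m kv =>
      let s := PySem.Set.ofList (ix.getD kv [])
      m.filter (fun i => PySem.Set.contains s i)) (ix.getD kv0 [])

def many_queries_many_vars_indices_alt (dicts : List (List (String × String))) (list_data : List (List (String × String))) : List Int :=
  let ix := mqIndex list_data
  let n : Int := list_data.length
  let counts : PySem.Dict Int Int := dicts.foldl (fun c dicti =>
    (mqMatched ix n dicti).foldl (fun c i => c.insert i (c.getD i 0 + 1)) c) PySem.Dict.empty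
  (PySem.List.pyRange 0 n 1).flatMap (fun i => (PySem.List.pyRange 0 (counts.getD i 0) 1).map (fun _ => i))

-- ===== PRECONDITION & SPEC =====
def Spec_many_queries_many_vars_indices (dicts : List (List (String × String))) (list_data : List (List (String × String))) (out : List Int) : Prop := out = many_queries_many_vars_indices_alt dicts list_data
instance (dicts : List (List (String × String))) (list_data : List (List (String × String))) (out : List Int) : Decidable (Spec_many_queries_many_vars_indices dicts list_data out) := by unfold Spec_many_queries_many_vars_indices; infer_instance

-- ===== CLAIM (what is proved, stated in full; the proofs are below) =====
def Claim_equal_many_queries_many_vars_indices : Prop := ∀ (dicts : List (List (String × String))) (list_data : List (List (String × String))), Dom_many_queries_many_vars_indices dicts list_data → Spec_many_queries_many_vars_indices dicts list_data (many_queries_many_vars_indices dicts list_data)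

-- ===== LEMMAS AND PROOFS =====

def mqCand (l : List (Int × List (String × String))) (p : List (String × String) → Bool) : List Int :=
  l.filterMap (fun pr => if p pr.2 then some pr.1 else none)
def mqMem (kv : String × String) (row : List (String × String)) : Bool :=
  decide (kv ∈ (PySem.Dict.ofList row).items)

theorem filter_beq_nodup {α} [BEq α] [LawfulBEq α] [DecidableEq α] (l : List α) (c : α) (h : l.Nodup) :
    l.filter (fun x => x == c) = if c ∈ l then [c] else [] := by
  induction l with
  | nil => simp
  | cons a t ih =>
    simp only [List.nodup_cons] at h
    by_cases hac : a = c
    · subst hac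
      have ht : t.filter (fun x => x == a) = [] := by
        apply List.filter_eq_nil_iff.mpr
        intro x hx
        simp only [beq_iff_eq]
        intro hxa; exact h.1 (hxa ▸ hx)
      simp [ht]
    · have hca : ¬ c = a := fun hh => hac hh.symm
      have hne : (a == c) = false := by simp [hac]
      simp only [List.filter_cons, hne, Bool.false_eq_true, if_false]
      rw [ih h.2]
      simp [List.mem_cons, hca]

lemma mqItems_nodup (row : List (String × String)) : (PySem.Dict.ofList row).items.Nodup := by
  have h := PySem.Dict.nodup_keys_ofList (ν := String) row
  have hk : (PySem.Dict.ofList row).keys = (PySem.Dict.ofList row).items.map (·.1) := rfl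
  rw [hk] at h
  exact h.of_map

lemma inner_getD (items : List (String × String)) (i : Int) (d : PySem.Dict (String × String) (List Int)) (c : String × String) :
    (items.foldl (fun d kv => d.modify kv [] (· ++ [i])) d).getD c []
      = d.getD c [] ++ (items.filter (· == c)).map (fun _ => i) := by
  have h1 : items.foldl (fun d kv => d.modify kv [] (· ++ [i])) d
      = (items.map (fun kv => (kv, i))).foldl (fun d p => d.modify p.1 [] (· ++ [p.2])) d := by
    rw [List.foldl_map]
  rw [h1, PySem.Dict.getD_foldl_modify_append]
  congr 1
  rw [List.filter_map, List.map_map]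
  rfl

lemma mqCand_cons (i : Int) (row : List (String × String)) (t : List (Int × List (String × String))) (p : List (String × String) → Bool) :
    mqCand ((i, row) :: t) p = (if p row then [i] else []) ++ mqCand t p := by
  by_cases h : p row <;> simp [mqCand, h]

lemma idx_aux (l : List (Int × List (String × String))) (d : PySem.Dict (String × String) (List Int)) (kv : String × String) :
    (l.foldl (fun ix p => (PySem.Dict.ofList p.2).items.foldl (fun ix kv => ix.modify kv [] (· ++ [p.1])) ix) d).getD kv []
      = d.getD kv [] ++ mqCand l (fun row => mqMem kv row) := by
  induction l generalizing d with
  | nil => simp [mqCand]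
  | cons pr t ih =>
    obtain ⟨i, row⟩ := pr
    rw [List.foldl_cons, ih, mqCand_cons]
    simp only []
    rw [inner_getD, filter_beq_nodup _ _ (mqItems_nodup row)]
    have : (if mqMem kv row then [i] else []) = ((if kv ∈ (PySem.Dict.ofList row).items then [kv] else []).map (fun _ => i)) := by
      by_cases h : kv ∈ (PySem.Dict.ofList row).items <;> simp [mqMem, h]
    rw [this, List.append_assoc]

lemma mem_fst_of_mem_mqCand {x : Int} {l : List (Int × List (String × String))} {p : List (String × String) → Bool}
    (h : x ∈ mqCand l p) : x ∈ l.map (·.1) := by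
  simp only [mqCand, List.mem_filterMap] at h
  obtain ⟨pr, hpr, hx⟩ := h
  split at hx
  · exact List.mem_map.mpr ⟨pr, hpr, by injection hx⟩
  · cases hx

lemma mqCand_filter_mem (l : List (Int × List (String × String))) (p p' : List (String × String) → Bool)
    (hnd : (l.map (·.1)).Nodup) :
    (mqCand l p).filter (fun x => decide (x ∈ mqCand l p')) = mqCand l (fun r => p r && p' r) := by
  induction l with
  | nil => simp [mqCand]
  | cons pr t ih =>
    obtain ⟨i, row⟩ := pr
    simp only [List.map_cons, List.nodup_cons] at hnd
    rw [mqCand_cons i row t p, mqCand_cons i row t (fun r => p r && p' r), List.filter_append]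
    have hnotmem : i ∉ mqCand t p' := fun hm => hnd.1 (mem_fst_of_mem_mqCand hm)
    have hiF : decide (i ∈ mqCand ((i, row) :: t) p') = p' row := by
      rw [mqCand_cons]
      by_cases h : p' row
      · simp [h]
      · simp [h, hnotmem]
    have hhead : (if p row then [i] else []).filter (fun x => decide (x ∈ mqCand ((i, row) :: t) p'))
        = (if p row && p' row then [i] else []) := by
      by_cases h : p row
      · by_cases h' : p' row <;> simp [h, h', hiF]
      · simp [h]
    have htail : (mqCand t p).filter (fun x => decide (x ∈ mqCand ((i, row) :: t) p'))
        = (mqCand t p).filter (fun x => decide (x ∈ mqCand t p')) := by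
      apply List.filter_congr
      intro x hx
      have hxi : x ≠ i := by
        intro hxeq; subst hxeq
        exact hnd.1 (mem_fst_of_mem_mqCand hx)
      rw [mqCand_cons]
      by_cases h' : p' row
      · simp [h', List.mem_cons, hxi]
      · simp [h']
    rw [hhead, htail, ih hnd.2]

def mqAll (dicti row : List (String × String)) : Bool :=
  (PySem.Dict.ofList dicti).items.all (fun kv => mqMem kv row)

lemma mqCand_congr (l : List (Int × List (String × String))) {p q : List (String × String) → Bool}
    (h : ∀ r, p r = q r) : mqCand l p = mqCand l q := by
  have : p = q := funext h
  rw [this]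

lemma mqIndex_getD (ld : List (List (String × String))) (kv : String × String) :
    (mqIndex ld).getD kv [] = mqCand (PySem.List.enumerate ld 0) (fun row => mqMem kv row) := by
  unfold mqIndex
  rw [idx_aux]
  simp [PySem.Dict.getD_empty]

lemma mqEnum_fst_nodup (ld : List (List (String × String))) : ((PySem.List.enumerate ld 0).map (·.1)).Nodup := by
  rw [PySem.List.map_fst_enumerate]
  exact PySem.List.nodup_pyRange_one _ _

lemma mqFold (ld : List (List (String × String))) (rest : List (String × String)) (q : List (String × String) → Bool) :
    rest.foldl (fun m kv =>
      let s := PySem.Set.ofList ((mqIndex ld).getD kv [])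
      m.filter (fun i => PySem.Set.contains s i)) (mqCand (PySem.List.enumerate ld 0) q)
    = mqCand (PySem.List.enumerate ld 0) (fun r => q r && rest.all (fun kv => mqMem kv r)) := by
  induction rest generalizing q with
  | nil => exact mqCand_congr _ (fun r => by simp)
  | cons kv rest ih =>
    rw [List.foldl_cons]
    have hfun : (fun i => PySem.Set.contains (PySem.Set.ofList ((mqIndex ld).getD kv [])) i)
        = (fun i : Int => decide (i ∈ mqCand (PySem.List.enumerate ld 0) (fun row => mqMem kv row))) := by
      funext i
      rw [Bool.eq_iff_iff]
      simp only [decide_eq_true_eq]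
      rw [← mqIndex_getD]
      constructor
      · intro h; exact (PySem.Set.mem_ofList _ _).mp ((PySem.Set.contains_iff _ _).mp h)
      · intro h; exact (PySem.Set.contains_iff _ _).mpr ((PySem.Set.mem_ofList _ _).mpr h)
    simp only [hfun]
    rw [mqCand_filter_mem _ _ _ (mqEnum_fst_nodup ld), ih]
    exact mqCand_congr _ (fun r => by simp [Bool.and_assoc])

lemma mqCand_true (l : List (Int × List (String × String))) :
    mqCand l (fun _ => true) = l.map (·.1) := by
  simp [mqCand]

lemma mqMatched_eq (ld : List (List (String × String))) (dicti : List (String × String)) :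
    mqMatched (mqIndex ld) ((ld.length : Int)) dicti
      = mqCand (PySem.List.enumerate ld 0) (fun row => mqAll dicti row) := by
  unfold mqMatched mqAll
  cases h : (PySem.Dict.ofList dicti).items with
  | nil =>
    show PySem.List.pyRange 0 (ld.length : Int) 1 = _
    rw [mqCand_congr _ (fun r => by simp : ∀ r, (List.all [] fun kv => mqMem kv r) = (fun _ : List (String × String) => true) r)]
    rw [mqCand_true, PySem.List.map_fst_enumerate]
    norm_num
  | cons kv0 rest =>
    show rest.foldl (fun m kv =>
        let s := PySem.Set.ofList ((mqIndex ld).getD kv [])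
        m.filter (fun i => PySem.Set.contains s i)) ((mqIndex ld).getD kv0 []) = _
    rw [mqIndex_getD, mqFold ld rest (fun r => mqMem kv0 r)]
    exact mqCand_congr _ (fun r => by simp)

lemma mqCounts_getD (ix : PySem.Dict (String × String) (List Int)) (n : Int)
    (ds : List (List (String × String))) (c : PySem.Dict Int Int) (i : Int) :
    (ds.foldl (fun c dicti => (mqMatched ix n dicti).foldl (fun c i => c.insert i (c.getD i 0 + 1)) c) c).getD i 0
      = c.getD i 0 + ((ds.map (fun q => ((mqMatched ix n q).count i : Int))).sum) := by
  induction ds generalizing c with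
  | nil => simp
  | cons q t ih =>
    rw [List.foldl_cons, ih, PySem.Dict.getD_foldl_insert_add_one]
    simp only [List.map_cons, List.sum_cons]
    ring

lemma mqCand_count (l : List (Int × List (String × String))) (p : List (String × String) → Bool)
    (hnd : (l.map (·.1)).Nodup) {pr : Int × List (String × String)} (hpr : pr ∈ l) :
    (mqCand l p).count pr.1 = if p pr.2 then 1 else 0 := by
  induction l with
  | nil => cases hpr
  | cons hd t ih =>
    obtain ⟨i, row⟩ := hd
    simp only [List.map_cons, List.nodup_cons] at hnd
    rw [mqCand_cons, List.count_append]
    rcases List.mem_cons.mp hpr with heq | hmem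
    · subst heq
      have h0 : (mqCand t p).count i = 0 := by
        rw [List.count_eq_zero]
        intro hm; exact hnd.1 (mem_fst_of_mem_mqCand hm)
      by_cases h : p row <;> simp [h, h0]
    · have hne : pr.1 ≠ i := by
        intro he; apply hnd.1; rw [← he]; exact List.mem_map.mpr ⟨pr, hmem, rfl⟩
      have hne' : ¬ i = pr.1 := fun he => hne he.symm
      have h1 : (if p row then [i] else []).count pr.1 = 0 := by
        by_cases h : p row <;> simp [h, hne']
      rw [h1, ih hnd.2 hmem]
      omega

def mqAllGet (dicti row : List (String × String)) : Bool :=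
  (PySem.Dict.ofList dicti).items.all (fun kv => (PySem.Dict.ofList row).get? kv.1 == some kv.2)

lemma mqAllGet_eq_mqAll (dicti row : List (String × String)) : mqAllGet dicti row = mqAll dicti row := by
  unfold mqAllGet mqAll
  rw [Bool.eq_iff_iff]
  simp only [List.all_eq_true, beq_iff_eq, mqMem, decide_eq_true_eq]
  constructor <;> intro h kv hkv
  · exact (PySem.Dict.get?_eq_some_iff_mem_items _ _ _ (PySem.Dict.nodup_keys_ofList _)).mp (h kv hkv)
  · exact (PySem.Dict.get?_eq_some_iff_mem_items _ _ _ (PySem.Dict.nodup_keys_ofList _)).mpr (h kv hkv)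

lemma mqHit_cond (q row : List (String × String)) :
    ((PySem.List.enumerate (PySem.Dict.ofList q).items 0).foldl (fun hit kv =>
        match (PySem.Dict.ofList row).get? kv.2.1 with
        | some v => if v == kv.2.2 then hit + 1 else hit
        | none => hit) (0:Int) == ((PySem.Dict.size (PySem.Dict.ofList q)) : Int)) = mqAllGet q row := by
  have hb : (fun (hit : Int) (kv : Int × (String × String)) =>
      match (PySem.Dict.ofList row).get? kv.2.1 with
      | some v => if v == kv.2.2 then hit + 1 else hit
      | none => hit)
      = (fun hit kv => if ((PySem.Dict.ofList row).get? kv.2.1 == some kv.2.2) then hit + 1 else hit) := by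
    funext hit kv
    cases hg : (PySem.Dict.ofList row).get? kv.2.1 with
    | none => simp
    | some v => simp
  rw [hb, PySem.List.foldl_if_add_one]
  have hc : (PySem.List.enumerate (PySem.Dict.ofList q).items 0).countP
      (fun kv => ((PySem.Dict.ofList row).get? kv.2.1 == some kv.2.2))
      = (PySem.Dict.ofList q).items.countP (fun kv => ((PySem.Dict.ofList row).get? kv.1 == some kv.2)) := by
    conv_rhs => rw [← PySem.List.map_snd_enumerate (PySem.Dict.ofList q).items 0]
    rw [List.countP_map]
    rfl
  rw [hc]
  rw [Bool.eq_iff_iff]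
  unfold mqAllGet
  have hsz : (PySem.Dict.size (PySem.Dict.ofList q)) = (PySem.Dict.ofList q).items.length := rfl
  simp only [zero_add, beq_iff_eq, hsz, Nat.cast_inj, List.all_eq_true]
  rw [List.countP_eq_length]
  simp

lemma mqFilter_enum_map_const (xs : List (List (String × String))) (s : Int)
    (p0 : List (String × String) → Bool) (c : Int) :
    ((PySem.List.enumerate xs s).filter (fun q => p0 q.2)).map (fun _ => c)
      = (xs.filter p0).map (fun _ => c) := by
  induction xs generalizing s with
  | nil => rfl
  | cons x t ih =>
    rw [PySem.List.enumerate_cons, List.filter_cons, List.filter_cons]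
    by_cases h : p0 x
    · simp only [h, if_true, List.map_cons]
      rw [ih]
    · simp only [h, Bool.false_eq_true, if_false]
      exact ih (s + 1)

lemma mqA_eq (dicts list_data : List (List (String × String))) :
    many_queries_many_vars_indices dicts list_data
      = (PySem.List.enumerate list_data 0).flatMap (fun pr =>
          (dicts.filter (fun q => mqAllGet q pr.2)).map (fun _ => pr.1)) := by
  unfold many_queries_many_vars_indices
  have houter : (fun (q_idxes : List Int) (p : Int × List (String × String)) =>
      (PySem.List.enumerate dicts 0).foldl (fun q_idxes q =>
        let d := PySem.Dict.ofList q.2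
        let hit : Int := (PySem.List.enumerate d.items 0).foldl (fun hit kv =>
          match (PySem.Dict.ofList p.2).get? kv.2.1 with
          | some v => if v == kv.2.2 then hit + 1 else hit
          | none => hit) 0
        if hit == (PySem.Dict.size d : Int) then q_idxes ++ [p.1] else q_idxes) q_idxes)
      = (fun q_idxes p => q_idxes ++ ((dicts.filter (fun q => mqAllGet q p.2)).map (fun _ => p.1))) := by
    funext q_idxes p
    rw [PySem.List.foldl_append_if
      (p := fun q : Int × List (String × String) =>
        ((PySem.List.enumerate (PySem.Dict.ofList q.2).items 0).foldl (fun hit kv =>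
          match (PySem.Dict.ofList p.2).get? kv.2.1 with
          | some v => if v == kv.2.2 then hit + 1 else hit
          | none => hit) (0:Int) == ((PySem.Dict.size (PySem.Dict.ofList q.2)) : Int)))
      (f := fun _ => p.1)]
    congr 1
    have hcond : (fun q : Int × List (String × String) =>
        ((PySem.List.enumerate (PySem.Dict.ofList q.2).items 0).foldl (fun hit kv =>
          match (PySem.Dict.ofList p.2).get? kv.2.1 with
          | some v => if v == kv.2.2 then hit + 1 else hit
          | none => hit) (0:Int) == ((PySem.Dict.size (PySem.Dict.ofList q.2)) : Int)))
        = (fun q : Int × List (String × String) => mqAllGet q.2 p.2) := by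
      funext qq
      exact mqHit_cond qq.2 p.2
    rw [hcond]
    exact mqFilter_enum_map_const dicts 0 (fun r => mqAllGet r p.2) p.1
  rw [houter, PySem.List.foldl_append_eq_flatMap]
  rfl

lemma mqFlatMap_congr {α β : Type} (l : List α) (f g : α → List β) (h : ∀ x ∈ l, f x = g x) :
    l.flatMap f = l.flatMap g := by
  induction l with
  | nil => rfl
  | cons x t ih =>
    rw [List.flatMap_cons, List.flatMap_cons, h x (List.mem_cons_self), ih (fun y hy => h y (List.mem_cons_of_mem x hy))]

theorem mq_final (dicts list_data : List (List (String × String))) :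
    many_queries_many_vars_indices dicts list_data = many_queries_many_vars_indices_alt dicts list_data := by
  rw [mqA_eq]
  unfold many_queries_many_vars_indices_alt
  simp only [mqCounts_getD, PySem.Dict.getD_empty, zero_add]
  simp only [mqMatched_eq]
  have h1 : ((list_data.length : Int)) = 0 + (list_data.length : Int) := by ring
  conv_rhs => rw [h1, ← PySem.List.map_fst_enumerate list_data 0]
  rw [List.flatMap_map]
  apply mqFlatMap_congr
  intro pr hpr
  have hsum : (dicts.map (fun q => (((mqCand (PySem.List.enumerate list_data 0) (fun row => mqAll q row)).count pr.1 : Nat) : Int))).sum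
      = ((dicts.countP (fun q => mqAll q pr.2) : Nat) : Int) := by
    rw [show (dicts.map (fun q => (((mqCand (PySem.List.enumerate list_data 0) (fun row => mqAll q row)).count pr.1 : Nat) : Int)))
        = dicts.map (fun q => if mqAll q pr.2 then (1 : Int) else 0) from ?_]
    · exact PySem.List.sum_map_ite_one_zero _ _
    · apply List.map_congr_left
      intro q hq
      rw [mqCand_count _ _ (mqEnum_fst_nodup list_data) hpr]
      by_cases h : mqAll q pr.2 <;> simp [h]
  rw [hsum, PySem.List.pyRange_zero_natCast, List.map_map]
  have hl : (dicts.filter (fun q => mqAllGet q pr.2)) = dicts.filter (fun q => mqAll q pr.2) := by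
    apply List.filter_congr
    intro q _
    exact mqAllGet_eq_mqAll q pr.2
  rw [hl, List.map_const']
  have : ((fun _ : Int => pr.1) ∘ fun k : Nat => (k : Int)) = (fun _ : Nat => pr.1) := rfl
  rw [this, List.map_const', List.length_range, List.countP_eq_length_filter]

-- ===== VERDICT (by name: the statement is the Claim_ definition above) =====
theorem many_queries_many_vars_indices_spec : Claim_equal_many_queries_many_vars_indices := by
  intro dicts list_data _hdom
  exact mq_final dicts list_data
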